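-- pv_equiv track=rewrite | github.com/cerencodes/class-app | pages/alpha_calculator.py | collect_shared_score_fields
-- ===== SOURCE A (Python) =====
-- def collect_shared_score_fields(model_fields: dict[str, set[str]]) -> tuple[list[str], list[str]]:
--     if not model_fields:
--         return [], []
--
--     shared_fields = sorted(set.intersection(*model_fields.values()))
--     paired_dimensions = []
--     aggregate_scores = []
--
--     for field_name in shared_fields:
--         if field_name.endswith("_score") and f"{field_name[: -len('_score')]}_reasoning" in shared_fields:
--             paired_dimensions.append(field_name[: -len("_score")])
--         elif field_name == "score":
--             aggregate_scores.append(field_name)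
--         elif field_name.endswith("_score"):
--             aggregate_scores.append(field_name)
--
--     return sorted(set(paired_dimensions)), sorted(set(aggregate_scores))
-- ===== SOURCE B (Python) =====
-- def collect_shared_score_fields(model_fields: dict[str, set[str]]) -> tuple[list[str], list[str]]:
--     if not model_fields:
--         return [], []
--
--     # Count in how many models each field occurs; shared fields are those with count == len(model_fields).
--     n = len(model_fields)
--     counts = {}
--     for fields in model_fields.values():
--         for f in fields:
--             counts[f] = counts.get(f, 0) + 1
--
--     # Group shared fields by stripped prefix, recording whether the prefix has a _score / _reasoning form.
--     pair = {}
--     for f, c in counts.items():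
--         if c != n:
--             continue
--         if f.endswith("_score"):
--             s, r = pair.get(f[:-6], (False, False))
--             pair[f[:-6]] = (True, r)
--         elif f.endswith("_reasoning"):
--             s, r = pair.get(f[:-10], (False, False))
--             pair[f[:-10]] = (s, True)
--
--     paired = sorted(p for p, (s, r) in pair.items() if s and r)
--     aggregate = sorted([p + "_score" for p, (s, r) in pair.items() if s and not r]
--                        + (["score"] if counts.get("score") == n else []))
--     return paired, aggregate
-- ===== Notes on version B (the rewrite author's own statement) =====
-- stated objective: alternative
-- what changed: A intersects all field sets, sorts, and classifies each shared field in an if/elif loop with a membership scan for its '_reasoning' companion; B never intersects or scans: it counts occurrences of every field across models in one dict (shared = count equals number of models), then groups shared fields by stripped prefix into a second dict of (has_score, has_reasoning) flags, from which paired and aggregate lists are read off directly.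
import Mathlib
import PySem

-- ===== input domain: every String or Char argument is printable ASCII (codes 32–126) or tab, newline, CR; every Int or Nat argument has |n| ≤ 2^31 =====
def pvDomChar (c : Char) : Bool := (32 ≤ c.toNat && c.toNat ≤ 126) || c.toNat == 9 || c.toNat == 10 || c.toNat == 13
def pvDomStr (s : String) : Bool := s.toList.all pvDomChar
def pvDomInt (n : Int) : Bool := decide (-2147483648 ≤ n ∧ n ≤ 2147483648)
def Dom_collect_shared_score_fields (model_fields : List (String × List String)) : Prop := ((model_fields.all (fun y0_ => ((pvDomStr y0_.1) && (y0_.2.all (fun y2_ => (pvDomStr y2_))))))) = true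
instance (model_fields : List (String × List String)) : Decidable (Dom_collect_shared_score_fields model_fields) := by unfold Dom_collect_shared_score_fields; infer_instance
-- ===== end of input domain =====

-- B replaces A's set-intersection + sorted if/elif classification loop by two dict passes (an
-- occurrence counter across models and a prefix-grouping dict of (has_score, has_reasoning)
-- flags); equivalence is proved on all inputs that are images of a Python dict[str, set[str]].

-- ===== PORT A =====
def collect_shared_score_fields (model_fields : List (String × List String)) : List String × List String :=
  if model_fields = [] then ([], [])
  else
    let vals := model_fields.map (fun kv => kv.2)
    let shared0 : PySem.Set String :=
      vals.tail.foldl (fun acc w => PySem.Set.inter acc w) (PySem.Set.ofList (vals.headD []))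
    let shared_fields := PySem.List.sorted shared0 (fun x => x) false
    let res := shared_fields.foldl (fun (acc : List String × List String) f =>
      if PySem.Str.endswith f "_score" &&
          shared_fields.contains (PySem.Str.slice f none (some (-6)) ++ "_reasoning") then
        (acc.1 ++ [PySem.Str.slice f none (some (-6))], acc.2)
      else if f == "score" then (acc.1, acc.2 ++ [f])
      else if PySem.Str.endswith f "_score" then (acc.1, acc.2 ++ [f])
      else acc) ([], [])
    (PySem.List.sorted (PySem.Set.ofList res.1) (fun x => x) false,
     PySem.List.sorted (PySem.Set.ofList res.2) (fun x => x) false)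

-- ===== PORT B =====
def collect_shared_score_fields_alt (model_fields : List (String × List String)) : List String × List String :=
  if model_fields = [] then ([], [])
  else
    let n : Int := model_fields.length
    let counts : PySem.Dict String Int :=
      model_fields.foldl (fun d kv =>
        kv.2.foldl (fun d f => d.insert f (d.getD f 0 + 1)) d) PySem.Dict.empty
    let pair : PySem.Dict String (Bool × Bool) :=
      counts.items.foldl (fun (p : PySem.Dict String (Bool × Bool)) fc =>
        if fc.2 ≠ n then p
        else if PySem.Str.endswith fc.1 "_score" then
          let sr := p.getD (PySem.Str.slice fc.1 none (some (-6))) (false, false)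
          p.insert (PySem.Str.slice fc.1 none (some (-6))) (true, sr.2)
        else if PySem.Str.endswith fc.1 "_reasoning" then
          let sr := p.getD (PySem.Str.slice fc.1 none (some (-10))) (false, false)
          p.insert (PySem.Str.slice fc.1 none (some (-10))) (sr.1, true)
        else p) PySem.Dict.empty
    let paired := PySem.List.sorted
        ((pair.items.filter (fun q => q.2.1 && q.2.2)).map (fun q => q.1)) (fun x => x) false
    let aggregate := PySem.List.sorted
        ((pair.items.filter (fun q => q.2.1 && !q.2.2)).map (fun q => q.1 ++ "_score")
          ++ (if counts.get? "score" = some n then ["score"] else [])) (fun x => x) false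
    (paired, aggregate)

-- ===== PRECONDITION & SPEC =====
-- Pre_ states that the input is the image of a Python dict[str, set[str]]: keys pairwise distinct
-- and each value list duplicate-free. Every input the Python A can receive satisfies it (dicts and
-- sets cannot carry duplicates), so no input A returns on is excluded.
def Pre_collect_shared_score_fields (model_fields : List (String × List String)) : Prop :=
  (model_fields.map (fun kv => kv.1)).Nodup ∧ ∀ kv ∈ model_fields, kv.2.Nodup
instance (model_fields : List (String × List String)) : Decidable (Pre_collect_shared_score_fields model_fields) := by unfold Pre_collect_shared_score_fields; infer_instance

def pvWitness_collect_shared_score_fields : (List (String × List String)) :=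
  [("m1", ["a_score", "a_reasoning", "score", "b_score", "c"]),
   ("m2", ["a_score", "a_reasoning", "score", "b_score"])]

def Spec_collect_shared_score_fields (model_fields : List (String × List String)) (out : List String × List String) : Prop := out = collect_shared_score_fields_alt model_fields
instance (model_fields : List (String × List String)) (out : List String × List String) : Decidable (Spec_collect_shared_score_fields model_fields out) := by unfold Spec_collect_shared_score_fields; infer_instance

-- ===== CLAIM (what is proved, stated in full; the proofs are below) =====
def Claim_equal_collect_shared_score_fields : Prop := ∀ (model_fields : List (String × List String)), Dom_collect_shared_score_fields model_fields → Pre_collect_shared_score_fields model_fields → Spec_collect_shared_score_fields model_fields (collect_shared_score_fields model_fields)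

-- ===== LEMMAS AND PROOFS =====

-- s[:-k] of a string built as z ++ s (with len(s) = k) gives back z
lemma pv_slice_drop_append (z s : String) (k : Nat) (h1 : 1 < k) (hk : s.toList.length = k) :
    PySem.Str.slice (z ++ s) none (some (-OfNat.ofNat k)) = z := by
  apply String.toList_inj.mp
  rw [PySem.Str.toList_slice, PySem.Chars.slice_eq_listSlice,
      PySem.List.slice_to_neg_ofNat _ k h1]
  simp [hk]

lemma pv_ends_append (z s : String) : PySem.Str.endswith (z ++ s) s = true := by
  rw [PySem.Str.endswith_eq, PySem.Chars.endswith_iff]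
  simp

lemma pv_ends_decomp (f s : String) (k : Nat) (h1 : 1 < k) (hk : s.toList.length = k)
    (h : PySem.Str.endswith f s = true) :
    PySem.Str.slice f none (some (-OfNat.ofNat k)) ++ s = f := by
  rw [PySem.Str.endswith_eq, PySem.Chars.endswith_iff] at h
  obtain ⟨t, ht⟩ := h
  apply String.toList_inj.mp
  rw [String.toList_append, PySem.Str.toList_slice, PySem.Chars.slice_eq_listSlice,
      PySem.List.slice_to_neg_ofNat _ k h1, ← ht]
  simp [hk]

lemma pv_score_not_score : PySem.Str.endswith "score" "_score" = false := by decide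

-- a string cannot end with both "_score" and "_reasoning"
lemma pv_not_both (f : String) (h : PySem.Str.endswith f "_score" = true) :
    PySem.Str.endswith f "_reasoning" = false := by
  by_contra hne
  rw [Bool.not_eq_false] at hne
  rw [PySem.Str.endswith_eq, PySem.Chars.endswith_iff] at h hne
  obtain ⟨t1, h1⟩ := h
  obtain ⟨t2, h2⟩ := hne
  rw [← h1] at h2
  have hr : ("_reasoning".toList : List Char) = "_rea".toList ++ "soning".toList := by decide
  rw [hr, ← List.append_assoc] at h2
  have e1 : "soning".toList.length = 6 := by decide
  have e2 : "_score".toList.length = 6 := by decide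
  have e3 : "_rea".toList.length = 4 := by decide
  have hlen : (t2 ++ "_rea".toList).length = t1.length := by
    have hl := congrArg List.length h2
    simp only [List.length_append] at hl ⊢
    omega
  obtain ⟨-, h6⟩ := List.append_inj h2 hlen
  exact absurd h6 (by decide)

-- membership in A's intersection fold
lemma pv_mem_foldl_inter (l : List (List String)) (s : PySem.Set String) (x : String) :
    x ∈ l.foldl (fun acc w => PySem.Set.inter acc w) s ↔ x ∈ s ∧ ∀ w ∈ l, x ∈ w := by
  induction l generalizing s with
  | nil => simp
  | cons w t ih =>
    simp only [List.foldl_cons, ih, PySem.Set.mem_inter, List.mem_cons]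
    constructor
    · rintro ⟨⟨hs, hw⟩, ht⟩
      exact ⟨hs, fun v hv => hv.elim (fun e => e ▸ hw) (ht v)⟩
    · rintro ⟨hs, hall⟩
      exact ⟨⟨hs, hall w (Or.inl rfl)⟩, fun v hv => hall v (Or.inr hv)⟩

-- B's counter: getD is the total count across the value lists
lemma pv_getD_counts (mf : List (String × List String)) (d : PySem.Dict String Int) (x : String) :
    (mf.foldl (fun d kv => kv.2.foldl (fun d f => d.insert f (d.getD f 0 + 1)) d) d).getD x 0
      = d.getD x 0 + (mf.map (fun kv => (kv.2.count x : Int))).sum := by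
  induction mf generalizing d with
  | nil => simp
  | cons kv t ih =>
    simp only [List.foldl_cons, List.map_cons, List.sum_cons]
    rw [ih, PySem.Dict.getD_foldl_insert_add_one]
    ring

lemma pv_nodup_keys_counts (mf : List (String × List String)) (d : PySem.Dict String Int)
    (hd : d.keys.Nodup) :
    (mf.foldl (fun d kv => kv.2.foldl (fun d f => d.insert f (d.getD f 0 + 1)) d) d).keys.Nodup := by
  induction mf generalizing d with
  | nil => exact hd
  | cons kv t ih => exact ih _ (PySem.Dict.nodup_keys_foldl_insert _ _ _ hd)

lemma pv_sum_counts (mf : List (String × List String)) (x : String)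
    (hv : ∀ kv ∈ mf, kv.2.Nodup) :
    (mf.map (fun kv => (kv.2.count x : Int))).sum
      = ((mf.filter (fun kv => decide (x ∈ kv.2))).length : Int) := by
  induction mf with
  | nil => simp
  | cons kv t ih =>
    have hkv := hv kv (by simp)
    have ht := ih (fun k hk => hv k (List.mem_cons_of_mem _ hk))
    simp only [List.map_cons, List.sum_cons, List.filter_cons, ht]
    by_cases hx : x ∈ kv.2
    · rw [List.count_eq_one_of_mem hkv hx]
      simp [hx]
      ring
    · rw [List.count_eq_zero_of_not_mem hx]
      simp [hx]

-- sharedness in B: counter lookup equals the number of models iff the field is in every model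
lemma pv_counts_get? (mf : List (String × List String)) (x : String)
    (hmf : mf ≠ []) (hv : ∀ kv ∈ mf, kv.2.Nodup) :
    ((mf.foldl (fun d kv => kv.2.foldl (fun d f => d.insert f (d.getD f 0 + 1)) d)
        PySem.Dict.empty).get? x = some (mf.length : Int))
      ↔ ∀ kv ∈ mf, x ∈ kv.2 := by
  set D : PySem.Dict String Int :=
    mf.foldl (fun d kv => kv.2.foldl (fun d f => d.insert f (d.getD f 0 + 1)) d)
      PySem.Dict.empty with hDdef
  have hgetD : D.getD x 0 = ((mf.filter (fun kv => decide (x ∈ kv.2))).length : Int) := by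
    rw [hDdef, pv_getD_counts, PySem.Dict.getD_empty, pv_sum_counts mf x hv]
    ring
  have hpos : 0 < mf.length := List.length_pos_of_ne_nil hmf
  constructor
  · intro h
    have hD : D.getD x 0 = (mf.length : Int) := by
      rw [PySem.Dict.getD_eq_get?_getD, h]
      rfl
    rw [hgetD] at hD
    have hlen : (mf.filter (fun kv => decide (x ∈ kv.2))).length = mf.length := by
      exact_mod_cast hD
    rw [List.length_filter_eq_length_iff] at hlen
    intro kv hkv
    simpa using hlen kv hkv
  · intro h
    have hlen : (mf.filter (fun kv => decide (x ∈ kv.2))).length = mf.length := by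
      rw [List.length_filter_eq_length_iff]
      intro a ha
      simpa using h a ha
    have hD : D.getD x 0 = (mf.length : Int) := by rw [hgetD, hlen]
    cases hq : D.get? x with
    | none =>
      rw [PySem.Dict.getD_eq_get?_getD, hq] at hD
      simp at hD
      omega
    | some c =>
      rw [PySem.Dict.getD_eq_get?_getD, hq] at hD
      simp at hD
      rw [hD]

-- B's grouping step, named for the proofs (definitionally the lambda in the port)
def pvStep (n : Int) (p : PySem.Dict String (Bool × Bool)) (fc : String × Int) :
    PySem.Dict String (Bool × Bool) :=
  if fc.2 ≠ n then p
  else if PySem.Str.endswith fc.1 "_score" then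
    let sr := p.getD (PySem.Str.slice fc.1 none (some (-6))) (false, false)
    p.insert (PySem.Str.slice fc.1 none (some (-6))) (true, sr.2)
  else if PySem.Str.endswith fc.1 "_reasoning" then
    let sr := p.getD (PySem.Str.slice fc.1 none (some (-10))) (false, false)
    p.insert (PySem.Str.slice fc.1 none (some (-10))) (sr.1, true)
  else p

def pvAnyS (n : Int) (L : List (String × Int)) (z : String) : Bool :=
  L.any (fun fc => fc.2 == n && PySem.Str.endswith fc.1 "_score"
    && (PySem.Str.slice fc.1 none (some (-6)) == z))

def pvAnyR (n : Int) (L : List (String × Int)) (z : String) : Bool :=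
  L.any (fun fc => fc.2 == n && PySem.Str.endswith fc.1 "_reasoning"
    && (PySem.Str.slice fc.1 none (some (-10)) == z))

-- invariant of the grouping fold: the flags at z record whether some processed shared item
-- is z's "_score" / "_reasoning" form
lemma pv_pair_getD (n : Int) (L : List (String × Int)) (p0 : PySem.Dict String (Bool × Bool))
    (z : String) :
    (L.foldl (pvStep n) p0).getD z (false, false)
      = ((p0.getD z (false, false)).1 || pvAnyS n L z,
         (p0.getD z (false, false)).2 || pvAnyR n L z) := by
  induction L generalizing p0 with
  | nil => simp [pvAnyS, pvAnyR]
  | cons fc t ih =>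
    simp only [List.foldl_cons]
    rw [ih]
    have hconsS : pvAnyS n (fc :: t) z
        = ((fc.2 == n && PySem.Str.endswith fc.1 "_score"
            && (PySem.Str.slice fc.1 none (some (-6)) == z)) || pvAnyS n t z) := by
      simp only [pvAnyS, List.any_cons]
    have hconsR : pvAnyR n (fc :: t) z
        = ((fc.2 == n && PySem.Str.endswith fc.1 "_reasoning"
            && (PySem.Str.slice fc.1 none (some (-10)) == z)) || pvAnyR n t z) := by
      simp only [pvAnyR, List.any_cons]
    rw [hconsS, hconsR]
    by_cases hc : fc.2 = n
    · have hn : (fc.2 == n) = true := by simp [hc]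
      rw [hn]
      by_cases hS : PySem.Str.endswith fc.1 "_score" = true
      · have hR : PySem.Str.endswith fc.1 "_reasoning" = false := pv_not_both fc.1 hS
        have hstep : pvStep n p0 fc = p0.insert (PySem.Str.slice fc.1 none (some (-6)))
            (true, (p0.getD (PySem.Str.slice fc.1 none (some (-6))) (false, false)).2) := by
          unfold pvStep
          rw [if_neg (by simp [hc]), if_pos hS]
        rw [hstep, PySem.Dict.getD_insert, hS, hR]
        by_cases hz : z = PySem.Str.slice fc.1 none (some (-6))
        · rw [if_pos hz]
          subst hz
          simp
        · rw [if_neg hz]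
          have h2 : (PySem.Str.slice fc.1 none (some (-6)) == z) = false := by
            simp
            exact fun e => hz e.symm
          rw [h2]
          simp
      · have hS0 : PySem.Str.endswith fc.1 "_score" = false := by simpa using hS
        rw [hS0]
        by_cases hRe : PySem.Str.endswith fc.1 "_reasoning" = true
        · have hstep : pvStep n p0 fc = p0.insert (PySem.Str.slice fc.1 none (some (-10)))
              ((p0.getD (PySem.Str.slice fc.1 none (some (-10))) (false, false)).1, true) := by
            unfold pvStep
            rw [if_neg (by simp [hc]), if_neg hS, if_pos hRe]
          rw [hstep, PySem.Dict.getD_insert, hRe]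
          by_cases hz : z = PySem.Str.slice fc.1 none (some (-10))
          · rw [if_pos hz]
            subst hz
            simp
          · rw [if_neg hz]
            have h2 : (PySem.Str.slice fc.1 none (some (-10)) == z) = false := by
              simp
              exact fun e => hz e.symm
            rw [h2]
            simp
        · have hR0 : PySem.Str.endswith fc.1 "_reasoning" = false := by simpa using hRe
          have hstep : pvStep n p0 fc = p0 := by
            unfold pvStep
            rw [if_neg (by simp [hc]), if_neg hS, if_neg hRe]
          rw [hstep, hR0]
          simp
    · have hn : (fc.2 == n) = false := by simp [hc]
      have hstep : pvStep n p0 fc = p0 := by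
        unfold pvStep
        rw [if_pos hc]
      rw [hstep, hn]
      simp

lemma pv_nodup_keys_pair (n : Int) (L : List (String × Int))
    (p0 : PySem.Dict String (Bool × Bool)) (h : p0.keys.Nodup) :
    ((L.foldl (pvStep n) p0).keys).Nodup := by
  induction L generalizing p0 with
  | nil => exact h
  | cons fc t ih =>
    refine ih _ ?_
    unfold pvStep
    split
    · exact h
    · split
      · exact PySem.Dict.nodup_keys_insert _ _ _ h
      · split
        · exact PySem.Dict.nodup_keys_insert _ _ _ h
        · exact h

-- the scan flags, read back through the counter dict
lemma pv_anyS_iff (n : Int) (D : PySem.Dict String Int) (hnd : D.keys.Nodup) (z : String) :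
    pvAnyS n D.items z = true ↔ D.get? (z ++ "_score") = some n := by
  unfold pvAnyS
  rw [List.any_eq_true]
  constructor
  · rintro ⟨⟨k, c⟩, hmem, hp⟩
    simp only [Bool.and_eq_true, beq_iff_eq] at hp
    obtain ⟨⟨hn, hS⟩, hsl⟩ := hp
    have hf : z ++ "_score" = k := by
      rw [← hsl]
      exact pv_ends_decomp k "_score" 6 (by omega) (by decide) hS
    have hg := PySem.Dict.get?_of_mem_items _ hmem hnd
    rw [hf, hg]
    exact congrArg some hn
  · intro h
    refine ⟨(z ++ "_score", n), PySem.Dict.mem_items_of_get?_eq_some _ h, ?_⟩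
    simp only [Bool.and_eq_true, beq_iff_eq]
    exact ⟨⟨by simp, pv_ends_append z "_score"⟩,
      pv_slice_drop_append z "_score" 6 (by omega) (by decide)⟩

lemma pv_anyR_iff (n : Int) (D : PySem.Dict String Int) (hnd : D.keys.Nodup) (z : String) :
    pvAnyR n D.items z = true ↔ D.get? (z ++ "_reasoning") = some n := by
  unfold pvAnyR
  rw [List.any_eq_true]
  constructor
  · rintro ⟨⟨k, c⟩, hmem, hp⟩
    simp only [Bool.and_eq_true, beq_iff_eq] at hp
    obtain ⟨⟨hn, hS⟩, hsl⟩ := hp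
    have hf : z ++ "_reasoning" = k := by
      rw [← hsl]
      exact pv_ends_decomp k "_reasoning" 10 (by omega) (by decide) hS
    have hg := PySem.Dict.get?_of_mem_items _ hmem hnd
    rw [hf, hg]
    exact congrArg some hn
  · intro h
    refine ⟨(z ++ "_reasoning", n), PySem.Dict.mem_items_of_get?_eq_some _ h, ?_⟩
    simp only [Bool.and_eq_true, beq_iff_eq]
    exact ⟨⟨by simp, pv_ends_append z "_reasoning"⟩,
      pv_slice_drop_append z "_reasoning" 10 (by omega) (by decide)⟩

-- membership in a filtered-mapped items list, via lookups
lemma pv_mem_filter_map_items {ν : Type} (d : PySem.Dict String ν) (hnd : d.keys.Nodup)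
    (P : String × ν → Bool) (g : String × ν → String) (x : String) :
    (x ∈ (d.items.filter P).map g)
      ↔ ∃ k v, d.get? k = some v ∧ P (k, v) = true ∧ x = g (k, v) := by
  simp only [List.mem_map, List.mem_filter]
  constructor
  · rintro ⟨⟨k, v⟩, ⟨hmem, hp⟩, rfl⟩
    exact ⟨k, v, PySem.Dict.get?_of_mem_items _ hmem hnd, hp, rfl⟩
  · rintro ⟨k, v, hget, hp, rfl⟩
    exact ⟨(k, v), ⟨PySem.Dict.mem_items_of_get?_eq_some _ hget, hp⟩, rfl⟩

lemma pv_nodup_filter_map {ν : Type} (d : PySem.Dict String ν) (hnd : d.keys.Nodup)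
    (P : String × ν → Bool) (g : String → String) (hg : Function.Injective g) :
    ((d.items.filter P).map (fun q => g q.1)).Nodup := by
  have hkeys : (d.items.map (fun q => q.1)).Nodup := by
    simpa [PySem.Dict.keys] using hnd
  have h1 : ((d.items.filter P).map (fun q => q.1)).Nodup :=
    hkeys.sublist (List.filter_sublist.map _)
  have h2 : (d.items.filter P).map (fun q => g q.1)
      = ((d.items.filter P).map (fun q => q.1)).map g := by
    simp [List.map_map, Function.comp]
  rw [h2]
  exact h1.map hg

lemma pv_append_right_inj (s : String) : Function.Injective (fun x : String => x ++ s) := by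
  intro a b h
  apply String.toList_inj.mp
  have := congrArg String.toList h
  rw [String.toList_append, String.toList_append] at this
  exact List.append_cancel_right this

-- two lists with the same members, the second without duplicates, have the same sorted dedup
lemma pv_sortedSet_ext (xs ys : List String) (hy : ys.Nodup) (h : ∀ x, x ∈ xs ↔ x ∈ ys) :
    PySem.List.sorted (PySem.Set.ofList xs) (fun x => x) false
      = PySem.List.sorted ys (fun x => x) false := by
  refine PySem.List.sorted_eq_sorted_of_perm _ _ _ (fun a b hab => hab) ?_
  refine (List.perm_ext_iff_of_nodup (PySem.Set.nodup_ofList xs) hy).mpr ?_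
  intro a; rw [PySem.Set.mem_ofList]; exact h a

-- characterization of A's classification loop
lemma pv_loopA (T l : List String) (acc : List String × List String) :
    l.foldl (fun (acc : List String × List String) f =>
      if PySem.Str.endswith f "_score" &&
          T.contains (PySem.Str.slice f none (some (-6)) ++ "_reasoning") then
        (acc.1 ++ [PySem.Str.slice f none (some (-6))], acc.2)
      else if f == "score" then (acc.1, acc.2 ++ [f])
      else if PySem.Str.endswith f "_score" then (acc.1, acc.2 ++ [f])
      else acc) acc
    = (acc.1 ++ (l.filter (fun f => PySem.Str.endswith f "_score" &&
          T.contains (PySem.Str.slice f none (some (-6)) ++ "_reasoning"))).map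
          (fun f => PySem.Str.slice f none (some (-6))),
       acc.2 ++ l.filter (fun f => !(PySem.Str.endswith f "_score" &&
          T.contains (PySem.Str.slice f none (some (-6)) ++ "_reasoning")) &&
          (f == "score" || PySem.Str.endswith f "_score"))) := by
  induction l generalizing acc with
  | nil => simp
  | cons f t ih =>
    simp only [List.foldl_cons, List.filter_cons]
    cases h1 : (PySem.Str.endswith f "_score" &&
        T.contains (PySem.Str.slice f none (some (-6)) ++ "_reasoning")) with
    | true =>
      simp only [if_true, List.map_cons]
      rw [ih]
      simp [List.append_assoc]
    | false =>
      cases h2 : (f == "score") with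
      | true =>
        simp only [Bool.false_eq_true, if_false, if_true]
        rw [ih]
        simp [List.append_assoc]
      | false =>
        cases h3 : PySem.Str.endswith f "_score" with
        | true =>
          simp only [Bool.false_eq_true, if_false, if_true]
          rw [ih]
          simp [List.append_assoc]
        | false =>
          simp only [Bool.false_eq_true, if_false]
          exact ih acc


lemma pv_contains_mem (l : List String) (x : String) : l.contains x = true ↔ x ∈ l := by
  simp

-- membership in a flag-filtered mapped items list, through getD
lemma pv_mem_paired (pr : PySem.Dict String (Bool × Bool)) (hnd : pr.keys.Nodup) (z : String) :
    (z ∈ (pr.items.filter (fun q => q.2.1 && q.2.2)).map (fun q => q.1))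
      ↔ ((pr.getD z (false, false)).1 = true ∧ (pr.getD z (false, false)).2 = true) := by
  rw [pv_mem_filter_map_items pr hnd (fun q => q.2.1 && q.2.2) (fun q => q.1) z]
  constructor
  · rintro ⟨k, v, hget, hp, hz⟩
    have hz' : z = k := hz
    subst hz'
    have hp' : (v.1 && v.2) = true := hp
    rw [Bool.and_eq_true] at hp'
    have hv : v = pr.getD z (false, false) := by
      rw [PySem.Dict.getD_eq_get?_getD, hget]
      rfl
    exact ⟨by rw [← hv]; exact hp'.1, by rw [← hv]; exact hp'.2⟩
  · rintro ⟨h1, h2⟩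
    cases hq : pr.get? z with
    | none =>
      exfalso
      rw [PySem.Dict.getD_eq_get?_getD, hq] at h1
      simp at h1
    | some v =>
      have hv : v = pr.getD z (false, false) := by
        rw [PySem.Dict.getD_eq_get?_getD, hq]
        rfl
      refine ⟨z, v, hq, ?_, rfl⟩
      show (v.1 && v.2) = true
      rw [hv, h1, h2]
      decide

lemma pv_mem_agg (pr : PySem.Dict String (Bool × Bool)) (hnd : pr.keys.Nodup) (x : String) :
    (x ∈ (pr.items.filter (fun q => q.2.1 && !q.2.2)).map (fun q => q.1 ++ "_score"))
      ↔ ∃ k, (pr.getD k (false, false)).1 = true ∧ (pr.getD k (false, false)).2 = false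
          ∧ x = k ++ "_score" := by
  rw [pv_mem_filter_map_items pr hnd (fun q => q.2.1 && !q.2.2) (fun q => q.1 ++ "_score") x]
  constructor
  · rintro ⟨k, v, hget, hp, hx⟩
    have hp' : (v.1 && !v.2) = true := hp
    rw [Bool.and_eq_true, Bool.not_eq_true'] at hp'
    have hv : v = pr.getD k (false, false) := by
      rw [PySem.Dict.getD_eq_get?_getD, hget]
      rfl
    exact ⟨k, by rw [← hv]; exact hp'.1, by rw [← hv]; exact hp'.2, hx⟩
  · rintro ⟨k, h1, h2, hx⟩
    cases hq : pr.get? k with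
    | none =>
      exfalso
      rw [PySem.Dict.getD_eq_get?_getD, hq] at h1
      simp at h1
    | some v =>
      have hv : v = pr.getD k (false, false) := by
        rw [PySem.Dict.getD_eq_get?_getD, hq]
        rfl
      refine ⟨k, v, hq, ?_, hx⟩
      show (v.1 && !v.2) = true
      rw [hv, h1, h2]
      decide

lemma pv_loopA0 (T l : List String) :
    l.foldl (fun (acc : List String × List String) f =>
      if PySem.Str.endswith f "_score" &&
          T.contains (PySem.Str.slice f none (some (-6)) ++ "_reasoning") then
        (acc.1 ++ [PySem.Str.slice f none (some (-6))], acc.2)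
      else if f == "score" then (acc.1, acc.2 ++ [f])
      else if PySem.Str.endswith f "_score" then (acc.1, acc.2 ++ [f])
      else acc) ([], [])
    = ((l.filter (fun f => PySem.Str.endswith f "_score" &&
          T.contains (PySem.Str.slice f none (some (-6)) ++ "_reasoning"))).map
          (fun f => PySem.Str.slice f none (some (-6))),
       l.filter (fun f => !(PySem.Str.endswith f "_score" &&
          T.contains (PySem.Str.slice f none (some (-6)) ++ "_reasoning")) &&
          (f == "score" || PySem.Str.endswith f "_score"))) := by
  rw [pv_loopA]
  simp

lemma pv_A_shape (S : PySem.Set String) :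
    ((PySem.List.sorted (PySem.Set.ofList
        (((PySem.List.sorted S (fun x => x) false).foldl (fun (acc : List String × List String) f =>
          if PySem.Str.endswith f "_score" &&
              (PySem.List.sorted S (fun x => x) false).contains
                (PySem.Str.slice f none (some (-6)) ++ "_reasoning") then
            (acc.1 ++ [PySem.Str.slice f none (some (-6))], acc.2)
          else if f == "score" then (acc.1, acc.2 ++ [f])
          else if PySem.Str.endswith f "_score" then (acc.1, acc.2 ++ [f])
          else acc) ([], [])).1)) (fun x => x) false),
     (PySem.List.sorted (PySem.Set.ofList
        (((PySem.List.sorted S (fun x => x) false).foldl (fun (acc : List String × List String) f =>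
          if PySem.Str.endswith f "_score" &&
              (PySem.List.sorted S (fun x => x) false).contains
                (PySem.Str.slice f none (some (-6)) ++ "_reasoning") then
            (acc.1 ++ [PySem.Str.slice f none (some (-6))], acc.2)
          else if f == "score" then (acc.1, acc.2 ++ [f])
          else if PySem.Str.endswith f "_score" then (acc.1, acc.2 ++ [f])
          else acc) ([], [])).2)) (fun x => x) false))
    = ((PySem.List.sorted (PySem.Set.ofList
          (((PySem.List.sorted S (fun x => x) false).filter (fun f =>
              PySem.Str.endswith f "_score" &&
              (PySem.List.sorted S (fun x => x) false).contains
                (PySem.Str.slice f none (some (-6)) ++ "_reasoning"))).map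
            (fun f => PySem.Str.slice f none (some (-6))))) (fun x => x) false),
       (PySem.List.sorted (PySem.Set.ofList
          ((PySem.List.sorted S (fun x => x) false).filter (fun f =>
            !(PySem.Str.endswith f "_score" &&
              (PySem.List.sorted S (fun x => x) false).contains
                (PySem.Str.slice f none (some (-6)) ++ "_reasoning")) &&
            (f == "score" || PySem.Str.endswith f "_score")))) (fun x => x) false)) := by
  rw [pv_loopA0]

-- the main equality on a non-empty input
lemma pv_main (kv0 : String × List String) (rest : List (String × List String))
    (hv : ∀ kv ∈ (kv0 :: rest), kv.2.Nodup) :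
    collect_shared_score_fields (kv0 :: rest) = collect_shared_score_fields_alt (kv0 :: rest) := by
  have hne : (kv0 :: rest : List (String × List String)) ≠ [] := by simp
  unfold collect_shared_score_fields collect_shared_score_fields_alt
  rw [if_neg hne, if_neg hne]
  simp only []
  rw [pv_A_shape (((kv0 :: rest : List (String × List String)).map (fun kv => kv.2)).tail.foldl
      (fun acc w => PySem.Set.inter acc w)
      (PySem.Set.ofList (((kv0 :: rest : List (String × List String)).map (fun kv => kv.2)).headD [])))]
  set n : Int := ((kv0 :: rest : List (String × List String)).length : Int) with hn
  have hstepeq : (fun (p : PySem.Dict String (Bool × Bool)) (fc : String × Int) =>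
      if fc.2 ≠ n then p
      else if PySem.Str.endswith fc.1 "_score" then
        p.insert (PySem.Str.slice fc.1 none (some (-6)))
          (true, (p.getD (PySem.Str.slice fc.1 none (some (-6))) (false, false)).2)
      else if PySem.Str.endswith fc.1 "_reasoning" then
        p.insert (PySem.Str.slice fc.1 none (some (-10)))
          ((p.getD (PySem.Str.slice fc.1 none (some (-10))) (false, false)).1, true)
      else p) = pvStep n := rfl
  rw [hstepeq]
  set cnts : PySem.Dict String Int :=
    (kv0 :: rest : List (String × List String)).foldl
      (fun d kv => kv.2.foldl (fun d f => d.insert f (d.getD f 0 + 1)) d) PySem.Dict.empty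
    with hcnts
  set pr : PySem.Dict String (Bool × Bool) :=
    cnts.items.foldl (pvStep n) PySem.Dict.empty with hpr
  -- shared-field characterizations of both sides
  have hSA : ∀ x, x ∈ (((kv0 :: rest : List (String × List String)).map (fun kv => kv.2)).tail.foldl
      (fun acc w => PySem.Set.inter acc w)
      (PySem.Set.ofList (((kv0 :: rest : List (String × List String)).map (fun kv => kv.2)).headD []))) ↔ ∀ kv ∈ (kv0 :: rest), x ∈ kv.2 := by
    intro x
    simp only [List.map_cons, List.tail_cons, List.headD_cons]
    rw [pv_mem_foldl_inter]
    simp only [PySem.Set.mem_ofList, List.mem_map, List.mem_cons]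
    constructor
    · rintro ⟨h0, hall⟩ kv hkv
      rcases hkv with rfl | hkv
      · exact h0
      · exact hall kv.2 ⟨kv, hkv, rfl⟩
    · intro h
      refine ⟨h kv0 (Or.inl rfl), ?_⟩
      rintro w ⟨kv, hkv, rfl⟩
      exact h kv (Or.inr hkv)
  have hndc : cnts.keys.Nodup := pv_nodup_keys_counts _ _ PySem.Dict.nodup_keys_empty
  have hget : ∀ x, (cnts.get? x = some n ↔ ∀ kv ∈ (kv0 :: rest), x ∈ kv.2) := fun x =>
    pv_counts_get? (kv0 :: rest) x hne hv
  have hndp : pr.keys.Nodup := pv_nodup_keys_pair _ _ _ PySem.Dict.nodup_keys_empty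
  have hgd : ∀ z, pr.getD z (false, false) = (pvAnyS n cnts.items z, pvAnyR n cnts.items z) := by
    intro z
    rw [hpr, pv_pair_getD]
    simp [PySem.Dict.getD_empty]
  have hPS : ∀ z, ((pr.getD z (false, false)).1 = true
      ↔ ∀ kv ∈ (kv0 :: rest), (z ++ "_score") ∈ kv.2) := by
    intro z
    rw [hgd]
    exact (pv_anyS_iff n cnts hndc z).trans (hget _)
  have hPR : ∀ z, ((pr.getD z (false, false)).2 = true
      ↔ ∀ kv ∈ (kv0 :: rest), (z ++ "_reasoning") ∈ kv.2) := by
    intro z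
    rw [hgd]
    exact (pv_anyR_iff n cnts hndc z).trans (hget _)
  rw [Prod.mk.injEq]
  constructor
  · -- paired dimensions
    refine pv_sortedSet_ext _ _ ?_ ?_
    · exact pv_nodup_filter_map pr hndp _ (fun x => x) Function.injective_id
    · intro z
      rw [pv_mem_paired pr hndp z]
      simp only [List.mem_map, List.mem_filter, Bool.and_eq_true, PySem.List.mem_sorted]
      constructor
      · rintro ⟨f, ⟨hfS, hfe, hfc⟩, rfl⟩
        constructor
        · rw [hPS]
          intro kv hkv
          rw [pv_ends_decomp f "_score" 6 (by omega) (by decide) hfe]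
          exact (hSA f).mp hfS kv hkv
        · rw [hPR]
          have hcm : (PySem.Str.slice f none (some (-6)) ++ "_reasoning") ∈ (((kv0 :: rest : List (String × List String)).map (fun kv => kv.2)).tail.foldl
      (fun acc w => PySem.Set.inter acc w)
      (PySem.Set.ofList (((kv0 :: rest : List (String × List String)).map (fun kv => kv.2)).headD []))) := by
            have h1 := (pv_contains_mem _ _).mp hfc
            rwa [PySem.List.mem_sorted] at h1
          exact (hSA _).mp hcm
      · rintro ⟨h1, h2⟩
        refine ⟨z ++ "_score", ⟨?_, pv_ends_append z "_score", ?_⟩, ?_⟩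
        · exact (hSA _).mpr ((hPS z).mp h1)
        · rw [pv_slice_drop_append z "_score" 6 (by omega) (by decide), pv_contains_mem,
            PySem.List.mem_sorted]
          exact (hSA _).mpr ((hPR z).mp h2)
        · exact pv_slice_drop_append z "_score" 6 (by omega) (by decide)
  · -- aggregate scores
    refine pv_sortedSet_ext _ _ ?_ ?_
    · refine List.Nodup.append ?_ ?_ ?_
      · exact pv_nodup_filter_map pr hndp _ (fun x => x ++ "_score") (pv_append_right_inj _)
      · split
        · exact List.nodup_singleton _
        · exact List.nodup_nil
      · intro a ha hb
        split at hb
        · have ha' : PySem.Str.endswith a "_score" = true := by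
            rcases List.mem_map.mp ha with ⟨q, -, rfl⟩
            exact pv_ends_append q.1 "_score"
          have hb' : a = "score" := by simpa using hb
          rw [hb', pv_score_not_score] at ha'
          exact absurd ha' (by simp)
        · simp at hb
    · intro x
      rw [List.mem_append, pv_mem_agg pr hndp x]
      simp only [List.mem_filter, Bool.and_eq_true, Bool.not_eq_true', Bool.or_eq_true,
        beq_iff_eq, PySem.List.mem_sorted]
      constructor
      · rintro ⟨hxS, hna, hor⟩
        by_cases hsc : x = "score"
        · right
          rw [if_pos ((hget "score").mpr (fun kv hkv => hsc ▸ (hSA x).mp hxS kv hkv))]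
          simp [hsc]
        · have hends : PySem.Str.endswith x "_score" = true := by
            rcases hor with h | h
            · exact absurd h hsc
            · exact h
          have hnc : (PySem.List.sorted (((kv0 :: rest : List (String × List String)).map (fun kv => kv.2)).tail.foldl
      (fun acc w => PySem.Set.inter acc w)
      (PySem.Set.ofList (((kv0 :: rest : List (String × List String)).map (fun kv => kv.2)).headD []))) (fun x => x) false).contains
              (PySem.Str.slice x none (some (-6)) ++ "_reasoning") = false := by
            rw [hends] at hna
            simpa using hna
          left
          refine ⟨PySem.Str.slice x none (some (-6)), ?_, ?_, ?_⟩
          · rw [hPS]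
            intro kv hkv
            rw [pv_ends_decomp x "_score" 6 (by omega) (by decide) hends]
            exact (hSA x).mp hxS kv hkv
          · by_contra hcon
            rw [Bool.not_eq_false] at hcon
            have hmc : (PySem.List.sorted (((kv0 :: rest : List (String × List String)).map (fun kv => kv.2)).tail.foldl
      (fun acc w => PySem.Set.inter acc w)
      (PySem.Set.ofList (((kv0 :: rest : List (String × List String)).map (fun kv => kv.2)).headD []))) (fun x => x) false).contains
                (PySem.Str.slice x none (some (-6)) ++ "_reasoning") = true := by
              rw [pv_contains_mem, PySem.List.mem_sorted]
              exact (hSA _).mpr ((hPR _).mp hcon)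
            rw [hmc] at hnc
            simp at hnc
          · exact (pv_ends_decomp x "_score" 6 (by omega) (by decide) hends).symm
      · rintro (⟨k, h1, h2, rfl⟩ | hb)
        · refine ⟨(hSA _).mpr ((hPS k).mp h1), ?_, Or.inr (pv_ends_append k "_score")⟩
          rw [pv_ends_append k "_score", pv_slice_drop_append k "_score" 6 (by omega) (by decide)]
          simp only [Bool.true_and]
          by_contra hcon
          rw [Bool.not_eq_false, pv_contains_mem, PySem.List.mem_sorted] at hcon
          have h3 := (hPR k).mpr ((hSA _).mp hcon)
          rw [h3] at h2
          simp at h2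
        · split at hb
          · rename_i hcond
            have hx : x = "score" := by simpa using hb
            subst hx
            refine ⟨(hSA _).mpr ((hget _).mp hcond), ?_, Or.inl rfl⟩
            rw [pv_score_not_score]
            rfl
          · simp at hb

-- ===== VERDICT (by name: the statement is the Claim_ definition above) =====
theorem collect_shared_score_fields_spec : Claim_equal_collect_shared_score_fields := by
  intro mf _ hpre
  unfold Spec_collect_shared_score_fields
  cases mf with
  | nil => rfl
  | cons kv0 rest => exact pv_main kv0 rest hpre.2
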